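-- pv_equiv track=rewrite | github.com/daiimus/gelatinous | world/emote.py | _split_speech_segments
-- ===== SOURCE A (Python) =====
-- def _split_speech_segments(text: str) -> list[tuple[str, bool]]:
--     """Split text into alternating non-speech / speech segments.
--
--     Speech is delimited by double quotes (``"..."``).  Unmatched
--     opening quotes treat the rest of the string as speech.
--
--     Args:
--         text: Raw input text.
--
--     Returns:
--         List of ``(segment_text, is_speech)`` tuples.
--     """
--     segments: list[tuple[str, bool]] = []
--     pos = 0
--     while pos < len(text):
--         # Find next opening quote
--         quote_start = text.find('"', pos)
--         if quote_start == -1: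
--             # No more quotes — rest is non-speech
--             remainder = text[pos:]
--             if remainder:
--                 segments.append((remainder, False))
--             break
--
--         # Non-speech before the quote
--         if quote_start > pos:
--             segments.append((text[pos:quote_start], False))
--
--         # Find closing quote
--         quote_end = text.find('"', quote_start + 1)
--         if quote_end == -1:
--             # Unmatched quote — rest is speech
--             speech_content = text[quote_start + 1:]
--             segments.append((speech_content, True))
--             break
--         else:
--             speech_content = text[quote_start + 1:quote_end]
--             segments.append((speech_content, True))
--             pos = quote_end + 1
--     return segments
-- ===== SOURCE B (Python) =====
-- def _split_speech_segments(text: str) -> list[tuple[str, bool]]: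
--     """Split text into alternating non-speech / speech segments.
--
--     B: split once on '"'; odd-indexed parts are speech (kept even when
--     empty), even-indexed parts are non-speech (kept only if non-empty).
--     """
--     segments: list[tuple[str, bool]] = []
--     for i, part in enumerate(text.split('"')):
--         if i % 2 == 1:
--             segments.append((part, True))
--         elif part:
--             segments.append((part, False))
--     return segments
-- ===== Notes on version B (the rewrite author's own statement) =====
-- stated objective: idiomatic
-- what changed: Replaces A's two-pointer find/find-closing index scan with a single split on the double-quote character followed by one parity-driven enumerate pass (odd-indexed parts are speech, non-empty even-indexed parts are non-speech).
import Mathlib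
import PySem

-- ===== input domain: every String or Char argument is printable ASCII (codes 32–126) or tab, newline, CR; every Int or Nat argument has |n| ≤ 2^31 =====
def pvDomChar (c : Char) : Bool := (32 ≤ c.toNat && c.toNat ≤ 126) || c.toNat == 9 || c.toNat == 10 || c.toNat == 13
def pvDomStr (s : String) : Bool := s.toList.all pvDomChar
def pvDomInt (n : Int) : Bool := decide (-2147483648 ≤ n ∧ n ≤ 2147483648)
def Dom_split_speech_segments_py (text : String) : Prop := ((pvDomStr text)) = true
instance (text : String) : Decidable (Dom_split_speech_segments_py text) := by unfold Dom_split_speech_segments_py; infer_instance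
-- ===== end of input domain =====

-- B replaces A's two-pointer find/find scan by one split('"') followed by a parity-driven pass (idiomatic; same behaviour, return value only).


-- ===== PORT A =====
-- A's while-loop advances an index `pos` through `text`; it is ported as the obvious
-- recursion on the remaining suffix `cs` (the characters from `pos` on), with a fuel
-- counter only to make the same computation total (fuel = length+1 is never exhausted):
-- `text.find('"', pos)` becomes `Chars.find cs ['"']` and A's slices are re-based to `cs`
-- (the same values A computes).  String ops go through PySem.Chars (exact).
def splitSpeechAux : Nat → List Char → List (String × Bool)
  | 0, _ => []        -- fuel guard only; unreachable from the wrapper below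
  | fuel + 1, cs =>
    -- quote_start = text.find('"', pos), re-based: find on the remaining suffix
    if PySem.Chars.find cs ['"'] = -1 then
      -- no more quotes — rest is non-speech
      (if String.ofList cs ≠ "" then [(String.ofList cs, false)] else [])
    else
      -- non-speech before the quote (quote_start > pos ↔ 0 < find)
      (if 0 < PySem.Chars.find cs ['"'] then
         [(String.ofList (PySem.Chars.slice cs none (some (PySem.Chars.find cs ['"']))), false)]
       else []) ++
      -- quote_end = text.find('"', quote_start+1), re-based to rest = text[quote_start+1:]
      (if PySem.Chars.find (PySem.Chars.slice cs (some (PySem.Chars.find cs ['"'] + 1)) none) ['"'] = -1 then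
         -- unmatched quote — rest is speech
         [(String.ofList (PySem.Chars.slice cs (some (PySem.Chars.find cs ['"'] + 1)) none), true)]
       else
         (String.ofList (PySem.Chars.slice (PySem.Chars.slice cs (some (PySem.Chars.find cs ['"'] + 1)) none) none
            (some (PySem.Chars.find (PySem.Chars.slice cs (some (PySem.Chars.find cs ['"'] + 1)) none) ['"']))), true) ::
           splitSpeechAux fuel (PySem.Chars.slice (PySem.Chars.slice cs (some (PySem.Chars.find cs ['"'] + 1)) none)
             (some (PySem.Chars.find (PySem.Chars.slice cs (some (PySem.Chars.find cs ['"'] + 1)) none) ['"'] + 1)) none))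

def split_speech_segments_py (text : String) : List (String × Bool) :=
  splitSpeechAux (text.toList.length + 1) text.toList

-- ===== PORT B =====
-- B: parts = text.split('"'); odd-indexed parts are speech (kept even if empty),
-- even-indexed parts are non-speech (kept only if non-empty).
def split_speech_segments_py_alt (text : String) : List (String × Bool) :=
  match PySem.Str.split? text "\"" with
  | none => []          -- unreachable: the separator is non-empty
  | some parts =>
      (PySem.List.enumerate parts 0).foldl
        (fun segments ip =>
          if PySem.Int.mod ip.1 2 = 1 then segments ++ [(ip.2, true)]
          else if ip.2 ≠ "" then segments ++ [(ip.2, false)] else segments) []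

-- ===== PRECONDITION & SPEC =====
def Spec_split_speech_segments_py (text : String) (out : List (String × Bool)) : Prop := out = split_speech_segments_py_alt text
instance (text : String) (out : List (String × Bool)) : Decidable (Spec_split_speech_segments_py text out) := by unfold Spec_split_speech_segments_py; infer_instance

-- ===== CLAIM (what is proved, stated in full; the proofs are below) =====
def Claim_equal_split_speech_segments_py : Prop := ∀ (text : String), Dom_split_speech_segments_py text → Spec_split_speech_segments_py text (split_speech_segments_py text)

-- ===== LEMMAS AND PROOFS =====

-- Reference splitter: Python's text.split('"') as plain structural recursion.
def splitQ : List Char → List (List Char)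
  | [] => [[]]
  | c :: rest =>
    if c = '"' then [] :: splitQ rest
    else match splitQ rest with
      | [] => [[c]]
      | p :: ps => (c :: p) :: ps

-- Common consumer: how both programs turn the split pieces into segments.
def goSeg : List String → List (String × Bool)
  | [] => []
  | [p] => if p = "" then [] else [(p, false)]
  | p :: q :: rest => (if p = "" then [] else [(p, false)]) ++ (q, true) :: goSeg rest

theorem splitQ_ne_nil (cs : List Char) : splitQ cs ≠ [] := by
  induction cs with
  | nil => simp [splitQ]
  | cons c rest ih =>
    simp only [splitQ]
    split
    · simp
    · cases h : splitQ rest <;> simp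

theorem splitQ_no_quote (cs : List Char) (h : '"' ∉ cs) : splitQ cs = [cs] := by
  induction cs with
  | nil => rfl
  | cons c rest ih =>
    simp only [List.mem_cons, not_or] at h
    rw [splitQ, if_neg (fun hc => h.1 hc.symm), ih h.2]

theorem splitQ_decomp (pre suf : List Char) (h : '"' ∉ pre) :
    splitQ (pre ++ '"' :: suf) = pre :: splitQ suf := by
  induction pre with
  | nil => simp [splitQ]
  | cons c rest ih =>
    simp only [List.mem_cons, not_or] at h
    rw [List.cons_append, splitQ, if_neg (fun hc => h.1 hc.symm), ih h.2]

-- First occurrence of a quote decomposes the list.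
theorem first_quote (cs : List Char) (h : '"' ∈ cs) :
    ∃ pre suf, cs = pre ++ '"' :: suf ∧ '"' ∉ pre := by
  induction cs with
  | nil => cases h
  | cons c rest ih =>
    by_cases hc : c = '"'
    · exact ⟨[], rest, by simp [hc], by simp⟩
    · have hmem : '"' ∈ rest := by
        rcases List.mem_cons.mp h with h1 | h2
        · exact absurd h1.symm hc
        · exact h2
      rcases ih hmem with ⟨p, s, hps, hp⟩
      refine ⟨c :: p, s, by simp [hps], ?_⟩
      simp only [List.mem_cons, not_or]
      exact ⟨fun hq => hc hq.symm, hp⟩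

theorem quote_infix_iff (cs : List Char) : ['"'] <:+: cs ↔ '"' ∈ cs := by
  constructor
  · rintro ⟨s, t, hst⟩
    rw [← hst]; simp
  · intro h
    rcases first_quote cs h with ⟨p, s, rfl, -⟩
    exact ⟨p, s, by simp⟩

-- Python's split via the fuelled splitOn.go, characterised by splitQ.
theorem splitOn_go_eq (fuel : Nat) :
    ∀ (l cur : List Char) (acc : List (List Char)), l.length ≤ fuel →
      PySem.Chars.splitOn.go ['"'] fuel l cur acc =
        acc.reverse ++ (match splitQ l with
          | [] => []
          | p :: ps => (cur.reverse ++ p) :: ps) := by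
  induction fuel with
  | zero =>
    intro l cur acc hl
    have hnil : l = [] := List.eq_nil_of_length_eq_zero (Nat.le_zero.mp hl)
    subst hnil
    rw [PySem.Chars.splitOn.go.eq_def]
    simp [splitQ]
  | succ fuel ih =>
    intro l cur acc hl
    cases l with
    | nil =>
      rw [PySem.Chars.splitOn.go.eq_def]
      simp [splitQ]
    | cons c rest =>
      rw [PySem.Chars.splitOn.go.eq_def]
      by_cases hc : c = '"'
      · subst hc
        have hpref : List.isPrefixOf ['"'] ('"' :: rest) = true := by
          simp [List.isPrefixOf]
        simp only [hpref, if_true]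
        have hrest : rest.length ≤ fuel := by
          simpa using Nat.succ_le_succ_iff.mp hl
        rw [ih _ _ _ (by simpa using hrest)]
        cases hsp : splitQ rest with
        | nil => exact absurd hsp (splitQ_ne_nil rest)
        | cons p ps => simp [splitQ, hsp]
      · have hpref : List.isPrefixOf ['"'] (c :: rest) = false := by
          simp [List.isPrefixOf]
          intro hq; exact hc hq.symm
        simp only [hpref, Bool.false_eq_true, if_false]
        have hrest : rest.length ≤ fuel := by
          simpa using Nat.succ_le_succ_iff.mp hl
        rw [ih _ _ _ hrest]
        cases hsp : splitQ rest with
        | nil => exact absurd hsp (splitQ_ne_nil rest)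
        | cons p ps =>
          rw [splitQ, if_neg hc, hsp]
          simp

theorem splitOn_eq_splitQ (cs : List Char) :
    PySem.Chars.splitOn cs ['"'] = splitQ cs := by
  show PySem.Chars.splitOn.go ['"'] (cs.length + 1) cs [] [] = splitQ cs
  rw [splitOn_go_eq (cs.length + 1) cs [] [] (by omega)]
  cases hsp : splitQ cs with
  | nil => exact absurd hsp (splitQ_ne_nil cs)
  | cons p ps => simp

-- find on a quote-free list returns -1.
theorem find_quote_no (cs : List Char) (h : '"' ∉ cs) :
    PySem.Chars.find cs ['"'] = -1 := by
  rw [PySem.Chars.find_eq_neg_one_iff]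
  intro hi
  exact h ((quote_infix_iff cs).mp hi)

-- find returns the index of the first quote.
theorem find_quote_at (pre suf : List Char) (h : '"' ∉ pre) :
    PySem.Chars.find (pre ++ '"' :: suf) ['"'] = (pre.length : Int) := by
  have hinf : ['"'] <:+: (pre ++ '"' :: suf) := (quote_infix_iff _).mpr (by simp)
  have hne : PySem.Chars.find (pre ++ '"' :: suf) ['"'] ≠ -1 := fun h' =>
    ((PySem.Chars.find_eq_neg_one_iff _ _).mp h') hinf
  have hs := PySem.Chars.findFrom_natCast_spec (pre ++ '"' :: suf) ['"'] 0 (Nat.zero_le _)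
  simp only [Nat.cast_zero, PySem.Chars.findFrom_zero] at hs
  obtain ⟨h0, hpre, hmin⟩ := hs hne
  have hjlt : ¬ (PySem.Chars.find (pre ++ '"' :: suf) ['"']).toNat < pre.length := by
    intro hlt
    rcases List.cons_prefix_iff.mp hpre with ⟨l', hl', -⟩
    have hget : (pre ++ '"' :: suf)[(PySem.Chars.find (pre ++ '"' :: suf) ['"']).toNat]? = some '"' := by
      rw [← List.head?_drop, hl']; rfl
    rw [List.getElem?_append_left hlt] at hget
    obtain ⟨hlt', hval⟩ := List.getElem?_eq_some_iff.mp hget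
    exact h (hval ▸ List.getElem_mem hlt')
  have hge : ¬ pre.length < (PySem.Chars.find (pre ++ '"' :: suf) ['"']).toNat := by
    intro hlt
    apply hmin pre.length (Nat.zero_le _) hlt
    rw [List.drop_left]
    exact ⟨suf, rfl⟩
  omega

-- The two slices A takes, at the first quote.
theorem slice_pre (pre suf : List Char) :
    PySem.Chars.slice (pre ++ '"' :: suf) none (some (pre.length : Int)) = pre := by
  rw [PySem.Chars.slice_eq_listSlice, PySem.List.slice_to_natCast]
  exact List.take_left ..

theorem slice_suf (pre suf : List Char) :
    PySem.Chars.slice (pre ++ '"' :: suf) (some ((pre.length : Int) + 1)) none = suf := by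
  rw [PySem.Chars.slice_eq_listSlice]
  have h1 : ((pre.length : Int) + 1) = ((pre.length + 1 : Nat) : Int) := by push_cast; ring
  rw [h1, PySem.List.slice_from_natCast]
  have h2 : pre ++ '"' :: suf = (pre ++ ['"']) ++ suf := by simp
  rw [h2, List.drop_left' (by simp)]

-- A's scan equals the split-pieces consumer (fuel larger than the suffix length).
theorem aux_eq_goSeg (fuel : Nat) :
    ∀ cs : List Char, cs.length < fuel →
      splitSpeechAux fuel cs = goSeg ((splitQ cs).map String.ofList) := by
  induction fuel with
  | zero => intro cs h; omega
  | succ fuel ih =>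
    intro cs hlen
    by_cases hqs : PySem.Chars.find cs ['"'] = -1
    · rw [splitSpeechAux, if_pos hqs]
      have hno : '"' ∉ cs := fun hm =>
        ((PySem.Chars.find_eq_neg_one_iff _ _).mp hqs) ((quote_infix_iff cs).mpr hm)
      rw [splitQ_no_quote cs hno]
      by_cases hne : String.ofList cs = "" <;> simp [goSeg, hne]
    · have hmem : '"' ∈ cs := by
        by_contra hn; exact hqs (find_quote_no cs hn)
      obtain ⟨pre, suf, rfl, hp⟩ := first_quote cs hmem
      have hf := find_quote_at pre suf hp
      rw [splitSpeechAux, if_neg hqs, hf, slice_pre, slice_suf]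
      rw [splitQ_decomp pre suf hp]
      by_cases hqe : PySem.Chars.find suf ['"'] = -1
      · rw [if_pos hqe]
        have hno2 : '"' ∉ suf := fun hm =>
          ((PySem.Chars.find_eq_neg_one_iff _ _).mp hqe) ((quote_infix_iff suf).mpr hm)
        rw [splitQ_no_quote suf hno2]
        by_cases hpre : pre = [] <;> simp [hpre, goSeg, List.length_pos_iff]
      · rw [if_neg hqe]
        have hmem2 : '"' ∈ suf := by
          by_contra hn; exact hqe (find_quote_no suf hn)
        obtain ⟨p2, s2, rfl, hp2⟩ := first_quote suf hmem2
        have hf2 := find_quote_at p2 s2 hp2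
        simp only [List.length_append, List.length_cons] at hlen
        rw [hf2, slice_pre, slice_suf, ih s2 (by omega)]
        rw [splitQ_decomp p2 s2 hp2]
        by_cases hpre : pre = [] <;> simp [hpre, goSeg, List.length_pos_iff]

-- B's parity fold equals the split-pieces consumer.
theorem fold_eq_goSeg (ps : List String) :
    ∀ (s : Nat) (acc : List (String × Bool)),
    (PySem.List.enumerate ps (2 * (s : Int))).foldl
        (fun segments ip =>
          if PySem.Int.mod ip.1 2 = 1 then segments ++ [(ip.2, true)]
          else if ip.2 ≠ "" then segments ++ [(ip.2, false)] else segments) acc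
      = acc ++ goSeg ps := by
  induction ps using goSeg.induct with
  | case1 =>
    intro s acc
    simp [PySem.List.enumerate, goSeg]
  | case2 =>
    intro s acc
    have hmod : PySem.Int.mod (2 * (s : Int)) 2 ≠ 1 := by
      rw [PySem.Int.mod_eq_emod_of_pos (by norm_num)]; omega
    simp [PySem.List.enumerate, goSeg]
  | case3 p hp =>
    intro s acc
    have hmod : PySem.Int.mod (2 * (s : Int)) 2 ≠ 1 := by
      rw [PySem.Int.mod_eq_emod_of_pos (by norm_num)]; omega
    simp [PySem.List.enumerate, goSeg, hp]
  | case4 p q rest ih =>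
    intro s acc
    rw [PySem.List.enumerate_cons, PySem.List.enumerate_cons]
    have hmod0 : PySem.Int.mod (2 * (s : Int)) 2 ≠ 1 := by
      rw [PySem.Int.mod_eq_emod_of_pos (by norm_num)]; omega
    have hmod1 : PySem.Int.mod (2 * (s : Int) + 1) 2 = 1 := by
      rw [PySem.Int.mod_eq_emod_of_pos (by norm_num)]; omega
    simp only [List.foldl_cons, if_neg hmod0, if_pos hmod1]
    have hcast : (2 * (s : Int) + 1 + 1) = 2 * ((s + 1 : Nat) : Int) := by push_cast; ring
    rw [hcast, ih (s + 1)]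
    by_cases hps : p = "" <;> simp [hps, goSeg]

-- ===== VERDICT (by name: the statement is the Claim_ definition above) =====
theorem split_speech_segments_py_spec : Claim_equal_split_speech_segments_py := by
  intro text _
  show split_speech_segments_py text = split_speech_segments_py_alt text
  have hsplit : PySem.Str.split? text "\"" = some ((splitQ text.toList).map String.ofList) := by
    have hmap := PySem.Str.split?_map text "\""
    have htl : ("\"" : String).toList = ['"'] := by decide
    rw [htl] at hmap
    have hch : PySem.Chars.split? text.toList ['"'] = some (splitQ text.toList) := by
      rw [PySem.Chars.split?]
      simp [splitOn_eq_splitQ]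
    rw [hch] at hmap
    cases hx : PySem.Str.split? text "\"" with
    | none => rw [hx] at hmap; simp at hmap
    | some ps =>
      rw [hx] at hmap
      simp only [Option.map_some, Option.some.injEq] at hmap
      congr 1
      have h2 := congrArg (List.map String.ofList) hmap
      rw [List.map_map] at h2
      simpa [Function.comp_def, String.ofList_toList] using h2
  rw [split_speech_segments_py, aux_eq_goSeg (text.toList.length + 1) text.toList (by omega)]
  unfold split_speech_segments_py_alt
  rw [hsplit]
  have hf := fold_eq_goSeg ((splitQ text.toList).map String.ofList) 0 []
  simp only [Nat.cast_zero, mul_zero, List.nil_append] at hf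
  exact hf.symm
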